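-- pv_equiv track=rewrite | github.com/Fondamenti18/fondamenti-di-programmazione | students/1759100/homework04/program01.py | ricerca
-- ===== SOURCE A (Python) =====
-- def ricerca(x,dizionario,ris):
--     '''ricerca le chiavi da utilizzare per formare il sottoalbero. è connessa a genera_sottoalbero.'''
--     for j,k in dizionario.items():
--         if j==x :
--             ris[j]=k
--             for y in k:
--                 ricerca(y,dizionario,ris)
--         else: pass
--     return ris
-- ===== SOURCE B (Python) =====
-- def ricerca(x, dizionario, ris):
--     '''Iterative DFS with an explicit stack instead of recursion; dict lookup instead of scanning all items.'''
--     stack = [x]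
--     while stack:
--         nodo = stack.pop()
--         if nodo in dizionario:
--             figli = dizionario[nodo]
--             ris[nodo] = figli
--             stack.extend(reversed(figli))
--     return ris
-- ===== Notes on version B (the rewrite author's own statement) =====
-- stated objective: alternative
-- what changed: Replaced A's recursion, which rescans every item of the dictionary on each recursive call, by an iterative explicit-stack DFS that does one direct dict lookup per popped node.
import Mathlib
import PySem

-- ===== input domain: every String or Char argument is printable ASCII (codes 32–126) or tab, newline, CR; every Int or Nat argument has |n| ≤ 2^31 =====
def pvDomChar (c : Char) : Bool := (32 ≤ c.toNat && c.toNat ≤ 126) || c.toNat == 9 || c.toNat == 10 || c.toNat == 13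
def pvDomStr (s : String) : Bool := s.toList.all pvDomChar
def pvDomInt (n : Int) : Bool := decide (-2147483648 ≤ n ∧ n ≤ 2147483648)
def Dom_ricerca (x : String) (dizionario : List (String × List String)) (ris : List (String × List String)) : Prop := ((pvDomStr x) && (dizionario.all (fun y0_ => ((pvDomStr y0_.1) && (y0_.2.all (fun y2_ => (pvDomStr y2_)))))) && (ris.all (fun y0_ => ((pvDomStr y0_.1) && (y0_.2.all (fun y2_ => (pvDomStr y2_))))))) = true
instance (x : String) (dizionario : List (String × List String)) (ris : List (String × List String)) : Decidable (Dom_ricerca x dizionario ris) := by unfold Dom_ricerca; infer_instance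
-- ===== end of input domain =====

-- B replaces A's recursion (which rescans the whole dict once per visited node) by an explicit
-- stack-based DFS with a direct dict lookup per node; both A and B mutate `ris` in place in Python,
-- and the equivalence proved here is about the returned dict's items.

-- Python dict assignment ris[j] = k (overwrite keeps position, new key appends); used by both ports.
def dinsert (ris : List (String × List String)) (j : String) (k : List String) : List (String × List String) :=
  (PySem.Dict.insert (PySem.Dict.mk ris) j k).items

-- Termination measure helpers (pure totality devices; the guards they justify never fire on inputs
-- admitted by Pre_ricerca, where Python's A returns without revisiting a node on any path).
def mKeys (d : List (String × List String)) (vis : List String) : Nat :=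
  (((d.map Prod.fst).toFinset) \ vis.toFinset).card


-- Facts used by the termination arguments (cited from `decreasing_by`).
theorem mKeys_lt (d : List (String × List String)) (x : String) (vis : List String)
    (hk : x ∈ d.map Prod.fst) (hv : x ∉ vis) : mKeys d (x :: vis) < mKeys d vis := by
  apply Finset.card_lt_card
  have hsub : ((d.map Prod.fst).toFinset \ (x :: vis).toFinset) ⊆ ((d.map Prod.fst).toFinset \ vis.toFinset) := by
    apply Finset.sdiff_subset_sdiff (Finset.Subset.refl _)
    simp only [List.toFinset_cons]
    exact Finset.subset_insert _ _
  rw [Finset.ssubset_iff_of_subset hsub]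
  refine ⟨x, ?_, ?_⟩
  · simp [Finset.mem_sdiff, List.mem_toFinset, hk, hv]
  · simp [List.toFinset_cons]

theorem dict_get?_some_facts : ∀ (l : List (String × List String)) (x : String) (k : List String),
    PySem.Dict.get? (PySem.Dict.mk l) x = some k →
    x ∈ l.map Prod.fst ∧ k.length ≤ (l.map (fun p => p.2.length)).sum := by
  intro l
  induction l with
  | nil => intro x k h; simp [PySem.Dict.get?] at h
  | cons p rest ih =>
    intro x k h
    rw [PySem.Dict.get?_mk_cons] at h
    by_cases hpx : p.1 == x
    · simp only [hpx, if_pos] at h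
      obtain ⟨rfl⟩ : p.2 = k := by simpa using h
      refine ⟨?_, ?_⟩
      · simp only [List.map_cons, List.mem_cons]; left; exact (eq_of_beq hpx).symm ▸ rfl
      · simp
    · simp only [hpx, if_neg, Bool.false_eq_true, not_false_iff] at h
      obtain ⟨h1, h2⟩ := ih x k h
      refine ⟨by simp only [List.map_cons, List.mem_cons]; right; exact h1, by simp; omega⟩

theorem sum_map_const_nat {α : Type} (l : List α) (c : Nat) :
    (l.map (fun _ => c)).sum = l.length * c := by
  induction l with
  | nil => simp
  | cons a t ih => simp [ih]; ring

-- ===== PORT A =====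
-- literal transliteration of A: for (j,k) in dizionario.items(): if j == x: ris[j] = k; for y in k: ricerca(y,…).
-- The `vis` argument records the chain of keys currently being expanded: it is a termination guard only
-- (Python A recurses without it; on a cyclic chain Python raises RecursionError — excluded by Pre_ricerca).
mutual
def ricercaF (vis : List String) (x : String) (d : List (String × List String)) (ris : List (String × List String)) : List (String × List String) :=
  if hx : x ∈ vis then ris
  else goItems vis x hx d d (fun _ h => h) ris
termination_by (mKeys d vis, 1, 0)

def goItems (vis : List String) (x : String) (hx : x ∉ vis) (d : List (String × List String)) :
    (items : List (String × List String)) → (∀ p ∈ items, p ∈ d) →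
    List (String × List String) → List (String × List String)
  | [], _, ris => ris
  | (j, k) :: rest, hsub, ris =>
    if hj : j = x then
      goItems vis x hx d rest (fun p h => hsub p (List.mem_cons_of_mem _ h))
        (goChildren (x :: vis) d k (dinsert ris j k))
    else
      goItems vis x hx d rest (fun p h => hsub p (List.mem_cons_of_mem _ h)) ris
termination_by items _ _ => (mKeys d vis, 0, items.length)
decreasing_by
  · exact Prod.Lex.left _ _ (mKeys_lt d x vis (List.mem_map.mpr ⟨(j, k), hsub _ List.mem_cons_self, hj⟩) hx)
  · apply Prod.Lex.right; apply Prod.Lex.right; simp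
  · apply Prod.Lex.right; apply Prod.Lex.right; simp

def goChildren (vis : List String) (d : List (String × List String)) :
    List String → List (String × List String) → List (String × List String)
  | [], ris => ris
  | y :: ys, ris => goChildren vis d ys (ricercaF vis y d ris)
termination_by ks _ => (mKeys d vis, 2, ks.length)
end

def ricerca (x : String) (dizionario : List (String × List String)) (ris : List (String × List String)) : List (String × List String) :=
  ricercaF [] x dizionario ris

-- ===== PORT B =====
-- transliteration of Source B: stack = [x]; while stack: pop, and if the node is a key, record it and push
-- its children (Python pops from the end and extends with reversed(figli); here the list head is the
-- stack top, so the children are prepended in order — same visit order). Each stack entry carries the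
-- same path guard `vis` as port A, again only to make the loop total (Python B spins on a cycle).
def sumLens (d : List (String × List String)) : Nat := (d.map (fun p => p.2.length)).sum + 2
def phiB (d : List (String × List String)) (stack : List (String × List String)) : Nat :=
  (stack.map (fun e => sumLens d ^ mKeys d e.2)).sum

def loopB (d : List (String × List String)) :
    List (String × List String) → List (String × List String) → List (String × List String)
  | [], ris => ris
  | (x, vis) :: st, ris =>
    if hx : x ∈ vis then loopB d st ris
    else
      match hg : PySem.Dict.get? (PySem.Dict.mk d) x with
      | none => loopB d st ris
      | some k => loopB d (k.map (fun y => (y, x :: vis)) ++ st) (dinsert ris x k)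
termination_by stack _ => phiB d stack
decreasing_by
  · simp only [phiB, List.map_cons, List.sum_cons]
    exact Nat.lt_add_of_pos_left (Nat.pow_pos (by simp [sumLens]))
  · simp only [phiB, List.map_cons, List.sum_cons]
    exact Nat.lt_add_of_pos_left (Nat.pow_pos (by simp [sumLens]))
  · obtain ⟨hk, hlen⟩ := dict_get?_some_facts d x k hg
    simp only [phiB, List.map_cons, List.sum_cons, List.map_append, List.sum_append, List.map_map]
    have hconst : (k.map ((fun e => sumLens d ^ mKeys d e.2) ∘ fun y => (y, x :: vis))).sum
        = k.length * sumLens d ^ mKeys d (x :: vis) := by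
      exact sum_map_const_nat k (sumLens d ^ mKeys d (x :: vis))
    rw [hconst]
    have hm : mKeys d (x :: vis) < mKeys d vis := mKeys_lt d x vis hk hx
    have hS : 2 ≤ sumLens d := by simp [sumLens]
    have h1 : k.length * sumLens d ^ mKeys d (x :: vis) < sumLens d ^ (mKeys d (x :: vis) + 1) := by
      rw [Nat.pow_succ]
      have hkS : k.length < sumLens d := by simp only [sumLens]; omega
      have hp : 0 < sumLens d ^ mKeys d (x :: vis) := Nat.pow_pos (by omega)
      calc k.length * sumLens d ^ mKeys d (x :: vis)
          = sumLens d ^ mKeys d (x :: vis) * k.length := Nat.mul_comm _ _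
        _ < sumLens d ^ mKeys d (x :: vis) * sumLens d := Nat.mul_lt_mul_of_le_of_lt (Nat.le_refl _) hkS hp
    have h2 : sumLens d ^ (mKeys d (x :: vis) + 1) ≤ sumLens d ^ mKeys d vis :=
      Nat.pow_le_pow_right (by omega) (by omega)
    omega

def ricerca_alt (x : String) (dizionario : List (String × List String)) (ris : List (String × List String)) : List (String × List String) :=
  loopB dizionario [(x, [])] ris

-- ===== PRECONDITION & SPEC =====
-- Computable reachability closure over the dictionary's edges (key → its children), used only to state
-- the precondition: `reachablePlus d a` is every node reachable from a in one or more steps.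
def childrenOf (d : List (String × List String)) (a : String) : List String :=
  (PySem.Dict.get? (PySem.Dict.mk d) a).getD []
def reachStep (d : List (String × List String)) (s : List String) : List String :=
  (s ++ s.flatMap (childrenOf d)).eraseDups
def reachIter (d : List (String × List String)) : Nat → List String → List String
  | 0, s => s
  | n + 1, s => reachIter d n (reachStep d s)
def reachablePlus (d : List (String × List String)) (a : String) : List String :=
  reachIter d ((d.flatMap (fun p => p.2)).length + 1) (childrenOf d a).eraseDups

-- Pre_ excludes (i) association lists with duplicate keys, which a Python dict can never contain, and
-- (ii) inputs with a cycle among the nodes reachable from x, on which Python A raises RecursionError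
-- (and Python B loops); on every other input A returns normally.
def Pre_ricerca (x : String) (dizionario : List (String × List String)) (ris : List (String × List String)) : Prop :=
  (dizionario.map Prod.fst).Nodup ∧
  ∀ a ∈ x :: reachablePlus dizionario x, a ∉ reachablePlus dizionario a
instance (x : String) (dizionario : List (String × List String)) (ris : List (String × List String)) : Decidable (Pre_ricerca x dizionario ris) := by unfold Pre_ricerca; infer_instance

def pvWitness_ricerca : String × (List (String × List String)) × (List (String × List String)) :=
  ("a", [("a", ["b"])], [])

def Spec_ricerca (x : String) (dizionario : List (String × List String)) (ris : List (String × List String)) (out : List (String × List String)) : Prop := out = ricerca_alt x dizionario ris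
instance (x : String) (dizionario : List (String × List String)) (ris : List (String × List String)) (out : List (String × List String)) : Decidable (Spec_ricerca x dizionario ris out) := by unfold Spec_ricerca; infer_instance

-- ===== CLAIM (what is proved, stated in full; the proofs are below) =====
def Claim_equal_ricerca : Prop := ∀ (x : String) (dizionario : List (String × List String)) (ris : List (String × List String)), Dom_ricerca x dizionario ris → Pre_ricerca x dizionario ris → Spec_ricerca x dizionario ris (ricerca x dizionario ris)

-- ===== LEMMAS AND PROOFS =====




theorem loopB_nil (d ris_ : List (String × List String)) : loopB d [] ris_ = ris_ := by simp [loopB]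
theorem loopB_mem (d : List (String × List String)) (x : String) (vis : List String) (st ris_ : List (String × List String)) (hx : x ∈ vis) :
    loopB d ((x,vis)::st) ris_ = loopB d st ris_ := by rw [loopB]; simp [hx]
theorem loopB_none (d : List (String × List String)) (x : String) (vis : List String) (st ris_ : List (String × List String)) (hx : x ∉ vis)
    (hg : PySem.Dict.get? (PySem.Dict.mk d) x = none) :
    loopB d ((x,vis)::st) ris_ = loopB d st ris_ := by
  rw [loopB]; rw [dif_neg hx]; split
  · rfl
  · next k hk => rw [hg] at hk; cases hk
theorem loopB_some (d : List (String × List String)) (x : String) (vis : List String) (k : List String) (st ris_ : List (String × List String)) (hx : x ∉ vis)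
    (hg : PySem.Dict.get? (PySem.Dict.mk d) x = some k) :
    loopB d ((x,vis)::st) ris_ = loopB d (k.map (fun y => (y, x :: vis)) ++ st) (dinsert ris_ x k) := by
  rw [loopB]; rw [dif_neg hx]; split
  · next hk => rw [hg] at hk; cases hk
  · next k' hk => rw [hg] at hk; cases hk; rfl
theorem goChildren_nil (vis : List String) (d ris_ : List (String × List String)) : goChildren vis d [] ris_ = ris_ := by simp [goChildren]
theorem goChildren_cons (vis : List String) (d : List (String × List String)) (y : String) (ys : List String) (ris_ : List (String × List String)) :
    goChildren vis d (y::ys) ris_ = goChildren vis d ys (ricercaF vis y d ris_) := by simp [goChildren]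
theorem ricercaF_mem (vis : List String) (x : String) (d ris_ : List (String × List String)) (hx : x ∈ vis) :
    ricercaF vis x d ris_ = ris_ := by rw [ricercaF]; simp [hx]
theorem ricercaF_not_mem (vis : List String) (x : String) (d ris_ : List (String × List String)) (hx : x ∉ vis) :
    ricercaF vis x d ris_ = goItems vis x hx d d (fun _ h => h) ris_ := by rw [ricercaF]; simp [hx]
theorem goItems_nil (vis : List String) (x : String) (hx : x ∉ vis) (d : List (String × List String)) (h : ∀ p ∈ ([] : List (String × List String)), p ∈ d) (ris_ : List (String × List String)) :
    goItems vis x hx d [] h ris_ = ris_ := by simp [goItems]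
theorem goItems_cons_eq (vis : List String) (x : String) (hx : x ∉ vis) (d : List (String × List String)) (j : String) (k : List String) (rest : List (String × List String)) (hsub : ∀ p ∈ (j,k)::rest, p ∈ d) (ris_ : List (String × List String)) (hj : j = x) :
    goItems vis x hx d ((j,k)::rest) hsub ris_ = goItems vis x hx d rest (fun p h => hsub p (List.mem_cons_of_mem _ h)) (goChildren (x :: vis) d k (dinsert ris_ j k)) := by
  rw [goItems]; simp [hj]
theorem goItems_cons_ne (vis : List String) (x : String) (hx : x ∉ vis) (d : List (String × List String)) (j : String) (k : List String) (rest : List (String × List String)) (hsub : ∀ p ∈ (j,k)::rest, p ∈ d) (ris_ : List (String × List String)) (hj : ¬ j = x) :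
    goItems vis x hx d ((j,k)::rest) hsub ris_ = goItems vis x hx d rest (fun p h => hsub p (List.mem_cons_of_mem _ h)) ris_ := by
  rw [goItems]; simp [hj]

theorem goItems_no_match (vis : List String) (x : String) (hx : x ∉ vis) (d : List (String × List String)) :
    ∀ (items : List (String × List String)) (hsub : ∀ p ∈ items, p ∈ d) (ris_ : List (String × List String)),
      (∀ p ∈ items, p.1 ≠ x) → goItems vis x hx d items hsub ris_ = ris_ := by
  intro items
  induction items with
  | nil => intro hsub ris_ _; exact goItems_nil vis x hx d hsub ris_
  | cons p rest ih =>
    intro hsub ris_ hno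
    obtain ⟨j, k⟩ := p
    rw [goItems_cons_ne vis x hx d j k rest hsub ris_ (hno (j,k) List.mem_cons_self)]
    exact ih _ _ (fun p h => hno p (List.mem_cons_of_mem _ h))

theorem goItems_canon (vis : List String) (x : String) (hx : x ∉ vis) (d : List (String × List String)) :
    ∀ (items : List (String × List String)) (hnd : (items.map Prod.fst).Nodup) (hsub : ∀ p ∈ items, p ∈ d) (ris_ : List (String × List String)),
      goItems vis x hx d items hsub ris_ =
        match PySem.Dict.get? (PySem.Dict.mk items) x with
        | none => ris_
        | some k => goChildren (x :: vis) d k (dinsert ris_ x k) := by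
  intro items
  induction items with
  | nil =>
    intro hnd hsub ris_
    rw [goItems_nil]
    simp [PySem.Dict.get?]
  | cons p rest ih =>
    intro hnd hsub ris_
    obtain ⟨j, k⟩ := p
    rw [PySem.Dict.get?_mk_cons]
    by_cases hj : j = x
    · subst hj
      rw [goItems_cons_eq vis j hx d j k rest hsub ris_ rfl]
      rw [goItems_no_match vis j hx d rest _ _ ?hno]
      · simp
      case hno =>
        intro p hp
        have : j ∉ rest.map Prod.fst := by
          simp only [List.map_cons, List.nodup_cons] at hnd
          exact hnd.1
        intro hpx
        exact this (List.mem_map.mpr ⟨p, hp, hpx⟩)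
    · rw [goItems_cons_ne vis x hx d j k rest hsub ris_ hj]
      rw [ih (by simp only [List.map_cons, List.nodup_cons] at hnd; exact hnd.2) _ ris_]
      have : (j == x) = false := by simp [hj]
      simp [this]

theorem ricercaF_canon (d : List (String × List String)) (hnd : (d.map Prod.fst).Nodup) (vis : List String) (x : String) (ris_ : List (String × List String)) :
    ricercaF vis x d ris_ =
      if hx : x ∈ vis then ris_
      else
        match PySem.Dict.get? (PySem.Dict.mk d) x with
        | none => ris_
        | some k => goChildren (x :: vis) d k (dinsert ris_ x k) := by
  by_cases hx : x ∈ vis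
  · rw [ricercaF_mem vis x d ris_ hx, dif_pos hx]
  · rw [ricercaF_not_mem vis x d ris_ hx, dif_neg hx]
    exact goItems_canon vis x hx d d hnd (fun _ h => h) ris_

theorem loop_eq_ric (d : List (String × List String)) (hnd : (d.map Prod.fst).Nodup) :
    ∀ (n : Nat) (vis : List String), mKeys d vis < n →
      ∀ (x : String) (st ris_ : List (String × List String)),
        loopB d ((x, vis) :: st) ris_ = loopB d st (ricercaF vis x d ris_) := by
  intro n
  induction n with
  | zero => intro vis h; omega
  | succ n ih =>
    intro vis hv x st ris_
    by_cases hx : x ∈ vis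
    · rw [loopB_mem _ _ _ _ _ hx, ricercaF_mem _ _ _ _ hx]
    · cases hg : PySem.Dict.get? (PySem.Dict.mk d) x with
      | none =>
        rw [loopB_none _ _ _ _ _ hx hg, ricercaF_canon d hnd vis x ris_]
        simp [hx, hg]
      | some k =>
        obtain ⟨hkmem, _⟩ := dict_get?_some_facts d x k hg
        have hm : mKeys d (x :: vis) < n := by
          have h1 := mKeys_lt d x vis hkmem hx
          omega
        rw [loopB_some _ _ _ _ _ _ hx hg]
        have L2 : ∀ (ks : List String) (st' ris' : List (String × List String)),
            loopB d (ks.map (fun y => (y, x :: vis)) ++ st') ris' = loopB d st' (goChildren (x :: vis) d ks ris') := by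
          intro ks
          induction ks with
          | nil => intro st' ris'; rw [goChildren_nil]; simp
          | cons y ys ihk =>
            intro st' ris'
            simp only [List.map_cons, List.cons_append]
            rw [ih (x :: vis) hm y (ys.map (fun y => (y, x :: vis)) ++ st') ris']
            rw [ihk, goChildren_cons]
        rw [L2 k st (dinsert ris_ x k)]
        rw [ricercaF_canon d hnd vis x ris_]
        simp [hx, hg]

-- ===== VERDICT (by name: the statement is the Claim_ definition above) =====
theorem ricerca_spec : Claim_equal_ricerca := by
  intro x d ris _hdom hpre
  show ricerca x d ris = ricerca_alt x d ris
  simp only [ricerca, ricerca_alt]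
  rw [loop_eq_ric d hpre.1 (mKeys d [] + 1) [] (by omega) x [] ris]
  rw [loopB_nil]
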